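-- pv_equiv track=rewrite | github.com/cadegallen-prog/CC | scripts/comprehensive_classifier_audit.py | is_equivalent_type
-- ===== SOURCE A (Python) =====
-- def is_equivalent_type(type1: str, type2: str) -> bool:
--     """Check if two product types are equivalent"""
--     equivalents = {
--         ('led_light_bulb', 'light_bulb'),
--         ('gfci_usb_outlet', 'usb_outlet'),
--         ('smart_flush_mount_light', 'flush_mount_light'),
--         ('landscape_flood_light', 'flood_light', 'landscape_lighting'),
--         ('smart_deadbolt_lock', 'door_lock'),
--         ('circuit_breaker_kit', 'circuit_breaker'),
--         ('led_track_lighting_kit', 'track_lighting'),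
--         ('mini_pendant_light', 'pendant_light'),
--         ('electrical_load_center', 'load_center'),
--         ('hvac_air_filter', 'air_filter'),
--         ('bathroom_exhaust_fan', 'exhaust_fan'),
--         ('dual_flush_toilet', 'toilet'),
--         ('kitchen_sink_with_faucet', 'sink'),
--         ('chainsaw_tuneup_kit', 'tool_kit'),
--         ('hex_driver_bits', 'drill_bit'),
--         ('sds_plus_rebar_cutter', 'specialty_cutter'),
--         ('hvlp_paint_sprayer', 'paint_sprayer'),
--         ('velcro_fastener_tape', 'tape'),
--         ('safety_respirator_cartridge', 'safety_respirator'),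
--     }
--
--     # Check direct equivalence
--     for equiv_set in equivalents:
--         if type1 in equiv_set and type2 in equiv_set:
--             return True
--
--     return False
-- ===== SOURCE B (Python) =====
-- # Flat term -> group-id table written out once; the per-call group scan is gone.
-- _TERM_TO_GROUP = {
--     'led_light_bulb': 0,
--     'light_bulb': 0,
--     'gfci_usb_outlet': 1,
--     'usb_outlet': 1,
--     'smart_flush_mount_light': 2,
--     'flush_mount_light': 2,
--     'landscape_flood_light': 3,
--     'flood_light': 3,
--     'landscape_lighting': 3,
--     'smart_deadbolt_lock': 4,
--     'door_lock': 4,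
--     'circuit_breaker_kit': 5,
--     'circuit_breaker': 5,
--     'led_track_lighting_kit': 6,
--     'track_lighting': 6,
--     'mini_pendant_light': 7,
--     'pendant_light': 7,
--     'electrical_load_center': 8,
--     'load_center': 8,
--     'hvac_air_filter': 9,
--     'air_filter': 9,
--     'bathroom_exhaust_fan': 10,
--     'exhaust_fan': 10,
--     'dual_flush_toilet': 11,
--     'toilet': 11,
--     'kitchen_sink_with_faucet': 12,
--     'sink': 12,
--     'chainsaw_tuneup_kit': 13,
--     'tool_kit': 13,
--     'hex_driver_bits': 14,
--     'drill_bit': 14,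
--     'sds_plus_rebar_cutter': 15,
--     'specialty_cutter': 15,
--     'hvlp_paint_sprayer': 16,
--     'paint_sprayer': 16,
--     'velcro_fastener_tape': 17,
--     'tape': 17,
--     'safety_respirator_cartridge': 18,
--     'safety_respirator': 18
-- }
--
--
-- def is_equivalent_type(type1: str, type2: str) -> bool:
--     """Check if two product types are equivalent"""
--     g = _TERM_TO_GROUP.get(type1)
--     return g is not None and g == _TERM_TO_GROUP.get(type2)
-- ===== Notes on version B (the rewrite author's own statement) =====
-- stated objective: idiomatic
-- what changed: Replaces A's per-call scan over the 19 equivalence groups with a flat term-to-group-id dictionary built once at module load; the function body becomes two dict lookups and an equality check.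
import Mathlib
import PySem

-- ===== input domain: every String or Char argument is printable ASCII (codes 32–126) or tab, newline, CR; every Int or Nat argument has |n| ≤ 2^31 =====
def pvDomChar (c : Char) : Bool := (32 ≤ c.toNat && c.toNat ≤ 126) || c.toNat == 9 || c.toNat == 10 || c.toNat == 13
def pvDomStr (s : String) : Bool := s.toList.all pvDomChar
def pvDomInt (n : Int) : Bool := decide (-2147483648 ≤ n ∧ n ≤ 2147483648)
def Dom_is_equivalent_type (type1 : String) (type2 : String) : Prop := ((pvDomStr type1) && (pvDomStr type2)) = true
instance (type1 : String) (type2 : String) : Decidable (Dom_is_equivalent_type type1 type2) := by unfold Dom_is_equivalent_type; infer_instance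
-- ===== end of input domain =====

-- B replaces A's per-call scan over the equivalence groups by a flat term→group-id
-- table written out once; the body is two lookups and an equality check (idiomatic).

-- ===== PORT A =====
-- A's literal `equivalents` set of tuples; the loop's result is independent of the
-- set's iteration order, so the tuples are listed in source order.
def pvEquivalentsA : List (List String) :=
  [ ["led_light_bulb", "light_bulb"],
    ["gfci_usb_outlet", "usb_outlet"],
    ["smart_flush_mount_light", "flush_mount_light"],
    ["landscape_flood_light", "flood_light", "landscape_lighting"],
    ["smart_deadbolt_lock", "door_lock"],
    ["circuit_breaker_kit", "circuit_breaker"],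
    ["led_track_lighting_kit", "track_lighting"],
    ["mini_pendant_light", "pendant_light"],
    ["electrical_load_center", "load_center"],
    ["hvac_air_filter", "air_filter"],
    ["bathroom_exhaust_fan", "exhaust_fan"],
    ["dual_flush_toilet", "toilet"],
    ["kitchen_sink_with_faucet", "sink"],
    ["chainsaw_tuneup_kit", "tool_kit"],
    ["hex_driver_bits", "drill_bit"],
    ["sds_plus_rebar_cutter", "specialty_cutter"],
    ["hvlp_paint_sprayer", "paint_sprayer"],
    ["velcro_fastener_tape", "tape"],
    ["safety_respirator_cartridge", "safety_respirator"] ]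

-- the `for equiv_set in equivalents: if … return True` loop
def pvLoopA : List (List String) → String → String → Bool
  | [], _, _ => false
  | g :: rest, t1, t2 =>
      if g.contains t1 && g.contains t2 then true else pvLoopA rest t1 t2

def is_equivalent_type (type1 : String) (type2 : String) : Bool :=
  pvLoopA pvEquivalentsA type1 type2

-- ===== PORT B =====
-- Source B's literal _TERM_TO_GROUP dict (all keys distinct)
def pvTermToGroup : PySem.Dict String Int :=
  PySem.Dict.ofList [
    ("led_light_bulb", 0),
    ("light_bulb", 0),
    ("gfci_usb_outlet", 1),
    ("usb_outlet", 1),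
    ("smart_flush_mount_light", 2),
    ("flush_mount_light", 2),
    ("landscape_flood_light", 3),
    ("flood_light", 3),
    ("landscape_lighting", 3),
    ("smart_deadbolt_lock", 4),
    ("door_lock", 4),
    ("circuit_breaker_kit", 5),
    ("circuit_breaker", 5),
    ("led_track_lighting_kit", 6),
    ("track_lighting", 6),
    ("mini_pendant_light", 7),
    ("pendant_light", 7),
    ("electrical_load_center", 8),
    ("load_center", 8),
    ("hvac_air_filter", 9),
    ("air_filter", 9),
    ("bathroom_exhaust_fan", 10),
    ("exhaust_fan", 10),
    ("dual_flush_toilet", 11),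
    ("toilet", 11),
    ("kitchen_sink_with_faucet", 12),
    ("sink", 12),
    ("chainsaw_tuneup_kit", 13),
    ("tool_kit", 13),
    ("hex_driver_bits", 14),
    ("drill_bit", 14),
    ("sds_plus_rebar_cutter", 15),
    ("specialty_cutter", 15),
    ("hvlp_paint_sprayer", 16),
    ("paint_sprayer", 16),
    ("velcro_fastener_tape", 17),
    ("tape", 17),
    ("safety_respirator_cartridge", 18),
    ("safety_respirator", 18) ]

-- g = _TERM_TO_GROUP.get(type1); g is not None and g == _TERM_TO_GROUP.get(type2)
def is_equivalent_type_alt (type1 : String) (type2 : String) : Bool :=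
  match pvTermToGroup.get? type1, pvTermToGroup.get? type2 with
  | some g1, some g2 => g1 == g2
  | _, _ => false

-- ===== PRECONDITION & SPEC =====
def Spec_is_equivalent_type (type1 : String) (type2 : String) (out : Bool) : Prop := out = is_equivalent_type_alt type1 type2
instance (type1 : String) (type2 : String) (out : Bool) : Decidable (Spec_is_equivalent_type type1 type2 out) := by unfold Spec_is_equivalent_type; infer_instance

-- ===== CLAIM (what is proved, stated in full; the proofs are below) =====
def Claim_equal_is_equivalent_type : Prop := ∀ (type1 : String) (type2 : String), Dom_is_equivalent_type type1 type2 → Spec_is_equivalent_type type1 type2 (is_equivalent_type type1 type2)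

-- ===== LEMMAS AND PROOFS =====

-- all terms, in A's scan order
def pvAllTerms : List String := pvEquivalentsA.flatten

lemma pvLoopA_false_left (t1 t2 : String) :
    ∀ gs : List (List String), t1 ∉ gs.flatten → pvLoopA gs t1 t2 = false := by
  intro gs
  induction gs with
  | nil => intro _; rfl
  | cons g rest ih =>
      intro h
      simp only [List.flatten_cons, List.mem_append] at h
      push Not at h
      simp only [pvLoopA]
      have hc : g.contains t1 = false := by simpa using h.1
      rw [hc, Bool.false_and]
      simpa using ih h.2

lemma pvLoopA_false_right (t1 t2 : String) :
    ∀ gs : List (List String), t2 ∉ gs.flatten → pvLoopA gs t1 t2 = false := by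
  intro gs
  induction gs with
  | nil => intro _; rfl
  | cons g rest ih =>
      intro h
      simp only [List.flatten_cons, List.mem_append] at h
      push Not at h
      simp only [pvLoopA]
      have hc : g.contains t2 = false := by simpa using h.1
      rw [hc, Bool.and_false]
      simpa using ih h.2

set_option maxRecDepth 100000 in
lemma pvKeys_eq : pvTermToGroup.keys = pvAllTerms := by decide

lemma pvGet?_none {t : String} (h : t ∉ pvAllTerms) : pvTermToGroup.get? t = none := by
  rw [PySem.Dict.get?_eq_none_iff_not_mem_keys, pvKeys_eq]
  exact h

-- A and B agree on all pairs of known terms (a finite, closed check)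
set_option maxRecDepth 100000 in
lemma pvAgree_on_terms :
    ∀ s ∈ pvAllTerms, ∀ s' ∈ pvAllTerms,
      is_equivalent_type s s' = is_equivalent_type_alt s s' := by decide

-- ===== VERDICT (by name: the statement is the Claim_ definition above) =====
theorem is_equivalent_type_spec : Claim_equal_is_equivalent_type := by
  intro t1 t2 _
  unfold Spec_is_equivalent_type
  by_cases h1 : t1 ∈ pvAllTerms
  · by_cases h2 : t2 ∈ pvAllTerms
    · exact pvAgree_on_terms t1 h1 t2 h2
    · have hA : is_equivalent_type t1 t2 = false :=
        pvLoopA_false_right t1 t2 pvEquivalentsA h2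
      have hB : pvTermToGroup.get? t2 = none := pvGet?_none h2
      rw [hA]
      unfold is_equivalent_type_alt
      rw [hB]
      cases pvTermToGroup.get? t1 <;> rfl
  · have hA : is_equivalent_type t1 t2 = false :=
      pvLoopA_false_left t1 t2 pvEquivalentsA h1
    have hB : pvTermToGroup.get? t1 = none := pvGet?_none h1
    rw [hA]
    unfold is_equivalent_type_alt
    rw [hB]
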